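-- pv_equiv track=rewrite | github.com/MichaelaBajanova/advent-of-code | 2022/18/aoc-18.py | get_max_xyz
-- ===== SOURCE A (Python) =====
-- X = 0
--
-- Y = 1
--
-- Z = 2
--
-- def get_max_xyz(cubes):
--     max_x = 0
--     max_y = 0
--     max_z = 0
--     for cube in cubes:
--         if cube[X] > max_x:
--             max_x = cube[X]
--         if cube[Y] > max_y:
--             max_y = cube[Y]
--         if cube[Z] > max_z:
--             max_z = cube[Z]
--
--     return (max_x, max_y, max_z)
-- ===== SOURCE B (Python) =====
-- def get_max_xyz(cubes):
--     return tuple(max([0] + [cube[i] for cube in cubes]) for i in range(3))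
-- ===== Notes on version B (the rewrite author's own statement) =====
-- stated objective: simpler
-- what changed: Replaces A's single fused loop maintaining three running maxima with three independent max-reductions, one per axis, each over [0] plus that coordinate's projection.
import Mathlib
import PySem

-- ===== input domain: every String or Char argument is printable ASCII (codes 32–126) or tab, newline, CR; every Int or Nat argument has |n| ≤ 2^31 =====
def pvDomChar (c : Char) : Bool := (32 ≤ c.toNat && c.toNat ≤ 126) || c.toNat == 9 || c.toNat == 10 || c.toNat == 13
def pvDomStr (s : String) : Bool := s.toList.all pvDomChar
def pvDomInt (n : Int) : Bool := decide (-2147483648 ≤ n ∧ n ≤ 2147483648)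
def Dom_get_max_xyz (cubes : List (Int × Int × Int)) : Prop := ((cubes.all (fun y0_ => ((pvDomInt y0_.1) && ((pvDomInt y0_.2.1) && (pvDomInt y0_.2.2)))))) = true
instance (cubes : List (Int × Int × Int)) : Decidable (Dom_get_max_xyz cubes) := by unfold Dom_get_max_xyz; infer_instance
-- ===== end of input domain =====

-- B computes each axis's maximum as an independent reduction over [0] ++ projection,
-- instead of A's single fused loop carrying three running maxima (objective: simpler).

-- ===== PORT A =====
-- one pass, three running maxima, updated by `if cube[i] > max_i`
def get_max_xyz (cubes : List (Int × Int × Int)) : Int × Int × Int :=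
  cubes.foldl
    (fun acc cube =>
      let mx := if cube.1 > acc.1 then cube.1 else acc.1
      let my := if cube.2.1 > acc.2.1 then cube.2.1 else acc.2.1
      let mz := if cube.2.2 > acc.2.2 then cube.2.2 else acc.2.2
      (mx, my, mz))
    (0, 0, 0)

-- ===== PORT B =====
-- Python max over the nonempty list [0] + projection: fold `max` over the tail seeded with the head 0
def axisMax (xs : List Int) : Int := xs.foldl max 0

def get_max_xyz_alt (cubes : List (Int × Int × Int)) : Int × Int × Int :=
  (axisMax (cubes.map (·.1)), axisMax (cubes.map (·.2.1)), axisMax (cubes.map (·.2.2)))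

-- ===== PRECONDITION & SPEC =====
def Spec_get_max_xyz (cubes : List (Int × Int × Int)) (out : Int × Int × Int) : Prop := out = get_max_xyz_alt cubes
instance (cubes : List (Int × Int × Int)) (out : Int × Int × Int) : Decidable (Spec_get_max_xyz cubes out) := by unfold Spec_get_max_xyz; infer_instance

-- ===== CLAIM (what is proved, stated in full; the proofs are below) =====
def Claim_equal_get_max_xyz : Prop := ∀ (cubes : List (Int × Int × Int)), Dom_get_max_xyz cubes → Spec_get_max_xyz cubes (get_max_xyz cubes)

-- ===== LEMMAS AND PROOFS =====
theorem get_max_xyz_loop (cubes : List (Int × Int × Int)) (mx my mz : Int) :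
    cubes.foldl
      (fun acc cube =>
        let a := if cube.1 > acc.1 then cube.1 else acc.1
        let b := if cube.2.1 > acc.2.1 then cube.2.1 else acc.2.1
        let c := if cube.2.2 > acc.2.2 then cube.2.2 else acc.2.2
        (a, b, c))
      (mx, my, mz)
    = ((cubes.map (·.1)).foldl max mx,
       (cubes.map (·.2.1)).foldl max my,
       (cubes.map (·.2.2)).foldl max mz) := by
  induction cubes generalizing mx my mz with
  | nil => rfl
  | cons hd tl ih =>
      simp only [List.foldl, List.map]
      rw [ih]
      congr 1
      · rcases lt_or_ge mx hd.1 with h | h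
        · simp [max_eq_right h.le, if_pos h]
        · simp [max_eq_left h, if_neg (not_lt.mpr h)]
      congr 1
      · rcases lt_or_ge my hd.2.1 with h | h
        · simp [max_eq_right h.le, if_pos h]
        · simp [max_eq_left h, if_neg (not_lt.mpr h)]
      · rcases lt_or_ge mz hd.2.2 with h | h
        · simp [max_eq_right h.le, if_pos h]
        · simp [max_eq_left h, if_neg (not_lt.mpr h)]

-- ===== VERDICT (by name: the statement is the Claim_ definition above) =====
theorem get_max_xyz_spec : Claim_equal_get_max_xyz := by
  intro cubes _
  unfold Spec_get_max_xyz get_max_xyz get_max_xyz_alt axisMax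
  exact get_max_xyz_loop cubes 0 0 0
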